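-- pv_equiv track=rewrite | github.com/chinmayeegithubid/HealthNutriSnapAI | app.py | extract_nutrient_section
-- ===== SOURCE A (Python) =====
-- def extract_nutrient_section(text):
--     section, found = "", False
--     for line in text.split("\n"):
--         if any(word in line.lower() for word in ["carbohydrates", "protein", "fats", "fiber", "sugar"]):
--             found = True
--         if found:
--             section += line + "\n"
--     return section.strip()
-- ===== SOURCE B (Python) =====
-- def extract_nutrient_section(text):
--     lines = text.split("\n")
--     keywords = ["carbohydrates", "protein", "fats", "fiber", "sugar"]
--     start = next((i for i, line in enumerate(lines)
--                   if any(word in line.lower() for word in keywords)), None)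
--     if start is None:
--         return ""
--     return "\n".join(lines[start:]).strip()
-- ===== Notes on version B (the rewrite author's own statement) =====
-- stated objective: simpler
-- what changed: Replaces the flag-threaded accumulate loop (string + boolean state) with two phases: find the index of the first keyword line with next()/enumerate, then join the tail slice and strip it; no mutable accumulator remains.
import Mathlib
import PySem

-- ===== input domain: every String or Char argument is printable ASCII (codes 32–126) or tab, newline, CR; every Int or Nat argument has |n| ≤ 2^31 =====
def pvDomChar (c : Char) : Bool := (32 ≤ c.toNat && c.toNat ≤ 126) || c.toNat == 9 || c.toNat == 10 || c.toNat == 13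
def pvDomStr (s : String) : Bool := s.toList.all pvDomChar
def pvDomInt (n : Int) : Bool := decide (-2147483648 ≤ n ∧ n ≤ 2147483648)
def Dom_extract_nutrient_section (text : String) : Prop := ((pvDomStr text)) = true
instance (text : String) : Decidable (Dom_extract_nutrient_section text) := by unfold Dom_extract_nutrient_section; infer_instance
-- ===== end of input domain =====

-- B replaces A's flag-threaded accumulating loop by a two-phase decomposition: find the first
-- keyword line's index, then join-and-strip the tail slice (objective: simpler).


-- ===== PORT A =====
-- the keyword membership test 'any(word in line.lower() for word in [...])', shared verbatim by both programs
def pvMatch (line : String) : Bool :=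
  ["carbohydrates", "protein", "fats", "fiber", "sugar"].any
    (fun word => PySem.Str.isIn word (PySem.Str.lower line))

def extract_nutrient_section (text : String) : String :=
  let r := ((PySem.Str.split? text "\n").getD []).foldl
    (fun (acc : String × Bool) line =>
      let found := if pvMatch line then true else acc.2
      (if found then acc.1 ++ line ++ "\n" else acc.1, found))
    ("", false)
  PySem.Str.strip r.1

-- ===== PORT B =====
def extract_nutrient_section_alt (text : String) : String :=
  let lines := (PySem.Str.split? text "\n").getD []
  match (PySem.List.enumerate lines).find? (fun p => pvMatch p.2) with
  | none => ""
  | some p => PySem.Str.strip (PySem.Str.join "\n" (PySem.List.slice lines (some p.1) none))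

-- ===== PRECONDITION & SPEC =====
def Spec_extract_nutrient_section (text : String) (out : String) : Prop := out = extract_nutrient_section_alt text
instance (text : String) (out : String) : Decidable (Spec_extract_nutrient_section text out) := by unfold Spec_extract_nutrient_section; infer_instance

-- ===== CLAIM (what is proved, stated in full; the proofs are below) =====
def Claim_equal_extract_nutrient_section : Prop := ∀ (text : String), Dom_extract_nutrient_section text → Spec_extract_nutrient_section text (extract_nutrient_section text)

-- ===== LEMMAS AND PROOFS =====

-- A's loop body, as a named function
def pvStep (acc : String × Bool) (line : String) : String × Bool :=
  let found := if pvMatch line then true else acc.2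
  (if found then acc.1 ++ line ++ "\n" else acc.1, found)

-- what A accumulates once the flag is set: every remaining line followed by "\n"
def pvTail : List String → String
  | [] => ""
  | l :: ls => l ++ "\n" ++ pvTail ls

-- once found = true, the loop appends pvTail of the remaining lines
theorem pvFold_true (ls : List String) : ∀ acc : String,
    ls.foldl pvStep (acc, true) = (acc ++ pvTail ls, true) := by
  induction ls with
  | nil => intro acc; simp [pvTail]
  | cons l ls ih =>
      intro acc
      have h1 : pvStep (acc, true) l = (acc ++ l ++ "\n", true) := by simp [pvStep]
      rw [List.foldl_cons, h1, ih]
      simp [pvTail, String.append_assoc]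

-- the whole loop, characterised by the first matching index
theorem pvFold_false (ls : List String) :
    ls.foldl pvStep ("", false) =
      match ls.findIdx? pvMatch with
      | none => ("", false)
      | some k => (pvTail (ls.drop k), true) := by
  induction ls with
  | nil => simp
  | cons l ls ih =>
      by_cases h : pvMatch l = true
      · have h1 : pvStep ("", false) l = ("" ++ l ++ "\n", true) := by simp [pvStep, h]
        rw [List.foldl_cons, h1, pvFold_true, List.findIdx?_cons, if_pos h]
        simp [pvTail, String.append_assoc]
      · have h1 : pvStep ("", false) l = ("", false) := by simp [pvStep, h]
        rw [List.foldl_cons, h1, ih, List.findIdx?_cons, if_neg h]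
        cases ls.findIdx? pvMatch with
        | none => rfl
        | some k => simp

-- find? over enumerate = findIdx?, with the running offset
theorem pvFind_enumerate (ls : List String) : ∀ s : Nat,
    (PySem.List.enumerate ls (s : Int)).find? (fun p => pvMatch p.2) =
      (ls.findIdx? pvMatch).map (fun k => (((s + k : Nat) : Int), ls.getD k "")) := by
  induction ls with
  | nil => intro s; simp [PySem.List.enumerate]
  | cons l ls ih =>
      intro s
      rw [PySem.List.enumerate_cons]
      by_cases h : pvMatch l = true
      · simp [h, List.findIdx?_cons]
      · have : ((s : Int) + 1) = ((s + 1 : Nat) : Int) := by push_cast; ring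
        simp only [List.find?_cons, h, List.findIdx?_cons, Bool.false_eq_true, reduceIte, this,
          ih (s + 1), Option.map_map]
        cases ls.findIdx? pvMatch with
        | none => rfl
        | some k => simp; omega

-- stripping is blind to one trailing newline
theorem pvStrip_newline (cs : List Char) :
    PySem.Chars.strip (cs ++ ['\n']) = PySem.Chars.strip cs := by
  have hnl : PySem.Chars.isspace '\n' = true := by decide
  unfold PySem.Chars.strip PySem.Chars.lstrip PySem.Chars.rstrip
  rw [List.dropWhile_append]
  by_cases he : (List.dropWhile PySem.Chars.isspace cs).isEmpty = true
  · rw [if_pos he]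
    rw [List.isEmpty_iff] at he
    rw [he]
    simp [hnl]
  · rw [if_neg he]
    simp [List.reverse_append, hnl]

-- pvTail ys, as characters: the "\n"-join of ys followed by one '\n'
theorem pvTail_toList : ∀ (ys : List String), ys ≠ [] →
    (pvTail ys).toList = PySem.Chars.join ['\n'] (ys.map String.toList) ++ ['\n']
  | [], h => absurd rfl h
  | [l], _ => by
      have hnl : "\n".toList = ['\n'] := by decide
      simp [pvTail, hnl, PySem.Chars.join_singleton]
  | l :: y :: ys, _ => by
      have hnl : "\n".toList = ['\n'] := by decide
      have ih := pvTail_toList (y :: ys) (by simp)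
      show (l ++ "\n" ++ pvTail (y :: ys)).toList = _
      simp only [List.map_cons]
      rw [PySem.Chars.join_cons_cons]
      simp [ih, hnl]

-- ===== VERDICT (by name: the statement is the Claim_ definition above) =====
theorem extract_nutrient_section_spec : Claim_equal_extract_nutrient_section := by
  intro text _
  unfold Spec_extract_nutrient_section
  simp only [extract_nutrient_section, extract_nutrient_section_alt]
  set ls := (PySem.Str.split? text "\n").getD [] with hls
  have henum := pvFind_enumerate ls 0
  simp only [Nat.cast_zero, zero_add] at henum
  rw [show (fun (acc : String × Bool) line =>
        (if (if pvMatch line then true else acc.2) then acc.1 ++ line ++ "\n" else acc.1,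
         if pvMatch line then true else acc.2)) = pvStep from rfl]
  rw [pvFold_false, henum]
  cases h : ls.findIdx? pvMatch with
  | none =>
      show PySem.Str.strip "" = ""
      decide
  | some k =>
      have hk : k < ls.length := by
        simp [List.findIdx?_eq_some_iff_findIdx_eq] at h; omega
      have hdrop : PySem.List.slice ls (some (k : Int)) none = ls.drop k := by
        rw [PySem.List.slice_some_none, PySem.List.clampIdx_natCast, min_eq_left hk.le]
      have hne : ls.drop k ≠ [] := by
        simp [List.drop_eq_nil_iff]; omega
      simp only [Option.map_some, hdrop]
      show PySem.Str.strip (pvTail (ls.drop k)) = PySem.Str.strip (PySem.Str.join "\n" (ls.drop k))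
      unfold PySem.Str.strip
      congr 1
      rw [pvTail_toList _ hne, pvStrip_newline]
      simp [PySem.Str.join]
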